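-- pv_equiv track=rewrite | github.com/TheYakEmperor/babel | update_family_trees.py | inherit_geographic_data
-- ===== SOURCE A (Python) =====
-- def inherit_geographic_data(language_data):
--     """
--     Inherit geographic data (latitude, longitude, country_ids) for dialects
--     that don't have their own coordinates from their parent language/dialect.
--     Traverses the parent_id chain until finding a parent with coordinates.
--     Returns the count of dialects that inherited geographic data.
--     """
--     inherited_count = 0
--
--     def get_parent_coords(languoid_id, visited=None):
--         """Recursively find coordinates from parent chain."""
--         if visited is None:
--             visited = set()
--
--         # Prevent infinite loops
--         if languoid_id in visited:
--             return None, None, None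
--         visited.add(languoid_id)
--
--         if languoid_id not in language_data:
--             return None, None, None
--
--         data = language_data[languoid_id]
--         parent_id = data.get('parent_id', '')
--
--         if not parent_id or parent_id not in language_data:
--             return None, None, None
--
--         parent_data = language_data[parent_id]
--         parent_lat = parent_data.get('latitude', '')
--         parent_lon = parent_data.get('longitude', '')
--         parent_countries = parent_data.get('country_ids', '')
--
--         # If parent has coordinates, use them
--         if parent_lat and parent_lon:
--             return parent_lat, parent_lon, parent_countries
--
--         # Otherwise, keep climbing up the parent chain
--         return get_parent_coords(parent_id, visited)
--
--     # Process all dialects without coordinates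
--     for languoid_id, data in language_data.items():
--         if data.get('level') != 'dialect':
--             continue
--
--         # Check if dialect already has its own coordinates
--         lat = data.get('latitude', '')
--         lon = data.get('longitude', '')
--
--         if lat and lon:
--             continue  # Already has coordinates
--
--         # Try to inherit from parent chain
--         parent_lat, parent_lon, parent_countries = get_parent_coords(languoid_id)
--
--         if parent_lat and parent_lon:
--             data['latitude'] = parent_lat
--             data['longitude'] = parent_lon
--             # Also inherit country_ids if dialect doesn't have its own
--             if not data.get('country_ids', '') and parent_countries:
--                 data['country_ids'] = parent_countries
--             inherited_count += 1
--
--     return inherited_count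
-- ===== SOURCE B (Python) =====
-- def inherit_geographic_data(language_data):
--     """
--     Return the count of dialects without their own coordinates whose parent
--     chain reaches an ancestor that has coordinates.  Return-value equivalent to
--     the original; this version is pure (it does not write the inherited data
--     back into language_data).
--     """
--     # One pass to snapshot the static structure: parent pointers (only when the
--     # parent id is non-empty and present) and which languoids have coordinates.
--     parent = {}
--     has_coords = set()
--     for lid, data in language_data.items():
--         pid = data.get('parent_id', '')
--         if pid and pid in language_data:
--             parent[lid] = pid
--         if data.get('latitude', '') and data.get('longitude', ''):
--             has_coords.add(lid)
--
--     n = len(language_data)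
--     count = 0
--     for lid, data in language_data.items():
--         if data.get('level') != 'dialect':
--             continue
--         if lid in has_coords:
--             continue
--         cur = lid
--         for _ in range(n):           # a chain of distinct ancestors is shorter than n
--             cur = parent.get(cur)
--             if cur is None:
--                 break
--             if cur in has_coords:
--                 count += 1
--                 break
--     return count
-- ===== Notes on version B (the rewrite author's own statement) =====
-- stated objective: alternative
-- what changed: B replaces A's recursive visited-set climb over the dicts it mutates along the way with a one-pass static snapshot (parent-pointer map + set of ids that have coordinates) followed by a bounded iterative climb per coordinate-less dialect; B is pure (return-value equivalent; it does not write the inherited data back) and has no recursion, and the proof shows A's in-place mutation never changes the count.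
import Mathlib
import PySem

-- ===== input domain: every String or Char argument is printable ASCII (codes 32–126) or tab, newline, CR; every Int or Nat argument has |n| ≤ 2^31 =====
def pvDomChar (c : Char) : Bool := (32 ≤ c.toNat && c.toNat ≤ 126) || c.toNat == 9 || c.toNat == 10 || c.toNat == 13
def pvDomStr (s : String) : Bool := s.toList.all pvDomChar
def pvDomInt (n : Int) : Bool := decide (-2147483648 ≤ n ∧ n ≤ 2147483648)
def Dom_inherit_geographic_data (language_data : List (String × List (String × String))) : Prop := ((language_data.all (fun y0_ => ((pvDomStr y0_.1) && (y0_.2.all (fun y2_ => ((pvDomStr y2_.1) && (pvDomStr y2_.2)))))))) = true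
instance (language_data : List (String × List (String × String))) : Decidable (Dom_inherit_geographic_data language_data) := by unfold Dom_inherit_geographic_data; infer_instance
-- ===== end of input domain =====

-- B recomputes the same count from a one-pass static snapshot (parent map + coordinate set)
-- with a bounded iterative climb, instead of A's recursive visited-set climb over the dicts it
-- mutates as it goes; equivalence is about the RETURN VALUE only (B does not write the
-- inherited coordinates back into language_data).


abbrev pvLD := PySem.Dict String (PySem.Dict String String)

-- shared input conversion: the Python argument is a dict of dicts
def pvToDict (language_data : List (String × List (String × String))) : pvLD :=
  PySem.Dict.ofList (language_data.map (fun p => (p.1, PySem.Dict.ofList p.2)))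

-- ===== PORT A =====
-- get_parent_coords: literal transcription; the recursion terminates in Python because the
-- visited set grows inside the fixed key set, so fuel = |keys| + 2 is never exhausted
-- (the fuel-0 branch is a totalization guard only).
def pvGetParentCoords (d : pvLD) : Nat → String → PySem.Set String → Option (String × String × String)
  | 0, _, _ => none
  | fuel+1, u, visited =>
    if PySem.Set.contains visited u then none
    else
      let visited' := PySem.Set.add visited u
      match d.get? u with
      | none => none
      | some data =>
        let pid := data.getD "parent_id" ""
        if pid = "" ∨ d.contains pid = false then none
        else
          match d.get? pid with
          | none => none   -- unreachable: contains pid was just checked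
          | some pdata =>
            let plat := pdata.getD "latitude" ""
            let plon := pdata.getD "longitude" ""
            let pc := pdata.getD "country_ids" ""
            if plat ≠ "" ∧ plon ≠ "" then some (plat, plon, pc)
            else pvGetParentCoords d fuel pid visited'

-- one iteration of A's main loop (the state is the mutated dict and the count)
def pvAStep (fuel : Nat) (st : pvLD × Int) (lid : String) : pvLD × Int :=
  let d := st.1
  let cnt := st.2
  let data := d.getD lid PySem.Dict.empty
  if data.get? "level" ≠ some "dialect" then (d, cnt)
  else
    let lat := data.getD "latitude" ""
    let lon := data.getD "longitude" ""
    if lat ≠ "" ∧ lon ≠ "" then (d, cnt)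
    else
      match pvGetParentCoords d fuel lid PySem.Set.empty with
      | none => (d, cnt)
      | some (plat, plon, pc) =>
        if plat ≠ "" ∧ plon ≠ "" then
          let data1 := (data.insert "latitude" plat).insert "longitude" plon
          let data2 := if data1.getD "country_ids" "" = "" ∧ pc ≠ "" then data1.insert "country_ids" pc
                       else data1
          (d.insert lid data2, cnt + 1)
        else (d, cnt)

def inherit_geographic_data (language_data : List (String × List (String × String))) : Int :=
  let d0 := pvToDict language_data
  let fuel := d0.keys.length + 2
  (d0.keys.foldl (pvAStep fuel) (d0, 0)).2

-- ===== PORT B =====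
-- one pass building the static snapshot: parent pointers and the set of ids with coordinates
def pvBuild (d0 : pvLD) : PySem.Dict String String × PySem.Set String :=
  d0.items.foldl (fun st p =>
    let pid := p.2.getD "parent_id" ""
    let parent' := if pid ≠ "" ∧ d0.contains pid = true then st.1.insert p.1 pid else st.1
    let has' := if p.2.getD "latitude" "" ≠ "" ∧ p.2.getD "longitude" "" ≠ "" then PySem.Set.add st.2 p.1
                else st.2
    (parent', has')) (PySem.Dict.empty, PySem.Set.empty)

-- the bounded climb: 'for _ in range(n): cur = parent.get(cur); …'
def pvClimb (parent : PySem.Dict String String) (has : PySem.Set String) : Nat → String → Bool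
  | 0, _ => false
  | n+1, cur =>
    match parent.get? cur with
    | none => false
    | some p => if PySem.Set.contains has p then true else pvClimb parent has n p

def inherit_geographic_data_alt (language_data : List (String × List (String × String))) : Int :=
  let d0 := pvToDict language_data
  let pb := pvBuild d0
  let parent := pb.1
  let has := pb.2
  let n := d0.items.length
  d0.items.foldl (fun cnt p =>
    if p.2.get? "level" ≠ some "dialect" then cnt
    else if PySem.Set.contains has p.1 then cnt
    else if pvClimb parent has n p.1 then cnt + 1 else cnt) 0

-- ===== PRECONDITION & SPEC =====
def Spec_inherit_geographic_data (language_data : List (String × List (String × String))) (out : Int) : Prop := out = inherit_geographic_data_alt language_data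
instance (language_data : List (String × List (String × String))) (out : Int) : Decidable (Spec_inherit_geographic_data language_data out) := by unfold Spec_inherit_geographic_data; infer_instance

-- ===== CLAIM (what is proved, stated in full; the proofs are below) =====
def Claim_equal_inherit_geographic_data : Prop := ∀ (language_data : List (String × List (String × String))), Dom_inherit_geographic_data language_data → Spec_inherit_geographic_data language_data (inherit_geographic_data language_data)

-- ===== LEMMAS AND PROOFS =====

-- static parent step (w.r.t. a fixed dict): the parent id when it is non-empty and present
def pvPstep (d : pvLD) (u : String) : Option String :=
  match d.get? u with
  | none => none
  | some data =>
    let pid := data.getD "parent_id" ""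
    if pid ≠ "" ∧ d.contains pid = true then some pid else none

def pvF (d0 : pvLD) : Option String → Option String
  | none => none
  | some u => pvPstep d0 u

-- "this languoid has its own coordinates" in dict d
def pvHasC (d : pvLD) (u : String) : Bool :=
  match d.get? u with
  | none => false
  | some data => decide (data.getD "latitude" "" ≠ "" ∧ data.getD "longitude" "" ≠ "")

-- the static answer: some ancestor within keys-many steps has coordinates
def pvAns (d0 : pvLD) (u : String) : Prop :=
  ∃ k, 1 ≤ k ∧ k ≤ d0.keys.length ∧ ∃ v, (pvF d0)^[k] (some u) = some v ∧ pvHasC d0 v = true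

-- invariant tying the mutated dict d back to the original d0
def pvInv (d0 d : pvLD) : Prop :=
  (∀ x, pvPstep d x = pvPstep d0 x) ∧
  (∀ x, pvHasC d x = true → (pvHasC d0 x = true ∨ pvAns d0 x)) ∧
  (∀ x, pvHasC d0 x = true → pvHasC d x = true)

theorem pvF_iterate_none (d0 : pvLD) (k : Nat) : (pvF d0)^[k] none = none := by
  induction k with
  | zero => rfl
  | succ k ih => rw [Function.iterate_succ_apply]; exact ih

theorem pvF_isSome_of_le (d0 : pvLD) (x : Option String) (j k : Nat) (hjk : j ≤ k)
    (w : String) (h : (pvF d0)^[k] x = some w) : ∃ v, (pvF d0)^[j] x = some v := by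
  cases hv : (pvF d0)^[j] x with
  | some v => exact ⟨v, rfl⟩
  | none =>
    exfalso
    have : (pvF d0)^[k] x = none := by
      have hk : k = (k - j) + j := by omega
      rw [hk, Function.iterate_add_apply, hv, pvF_iterate_none]
    simp [this] at h

theorem pvPstep_elim (d : pvLD) (u p : String) (h : pvPstep d u = some p) :
    ∃ data, d.get? u = some data ∧ data.getD "parent_id" "" = p ∧ p ≠ "" ∧ d.contains p = true := by
  unfold pvPstep at h
  cases hg : d.get? u with
  | none => rw [hg] at h; simp at h
  | some data =>
    rw [hg] at h
    simp only at h
    split at h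
    next hc =>
      have hp := Option.some.inj h
      subst hp
      exact ⟨data, rfl, rfl, hc.1, hc.2⟩
    next => simp at h

theorem pvPstep_mem_keys (d0 : pvLD) (u p : String) (h : pvPstep d0 u = some p) : p ∈ d0.keys := by
  obtain ⟨data, _, _, _, hc⟩ := pvPstep_elim d0 u p h
  exact (PySem.Dict.contains_iff_mem_keys _ _).1 hc

theorem pvIter_period (g : Option String → Option String) (x : Option String) (i j : Nat)
    (hij : i ≤ j) (h : g^[i] x = g^[j] x) (l : Nat) (hl : i ≤ l) :
    g^[l + (j - i)] x = g^[l] x := by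
  have h1 : l + (j - i) = (l - i) + j := by omega
  have h2 : l = (l - i) + i := by omega
  rw [h1, Function.iterate_add_apply, ← h, ← Function.iterate_add_apply, ← h2]

-- pigeonhole pullback: a hit anywhere on the chain gives a hit within keys-many steps
theorem pvAns_of_iter (d0 : pvLD) (u : String) (m : Nat) (hm : 1 ≤ m) (v : String)
    (hit : (pvF d0)^[m] (some u) = some v) (hv : pvHasC d0 v = true) : pvAns d0 u := by
  induction m using Nat.strong_induction_on generalizing v with
  | _ m IH =>
  by_cases hle : m ≤ d0.keys.length
  · exact ⟨m, hm, hle, v, hit, hv⟩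
  · -- m > N: the first N+1 chain values are keys; two coincide, shorten the chain
    set N := d0.keys.length with hN
    have hmem : ∀ i ∈ Finset.Icc 1 (N + 1), ((pvF d0)^[i] (some u)).getD "" ∈ d0.keys.toFinset := by
      intro i hi
      simp only [Finset.mem_Icc] at hi
      obtain ⟨w, hw⟩ := pvF_isSome_of_le d0 (some u) i m (by omega) v hit
      obtain ⟨w', hw'⟩ := pvF_isSome_of_le d0 (some u) (i - 1) m (by omega) v hit
      have hstep : (pvF d0)^[i] (some u) = pvF d0 ((pvF d0)^[i-1] (some u)) := by
        conv_lhs => rw [show i = 1 + (i - 1) from by omega]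
        rw [Function.iterate_add_apply, Function.iterate_one]
      rw [hstep, hw'] at hw
      have : w ∈ d0.keys := pvPstep_mem_keys d0 w' w hw
      rw [hstep, hw']
      simpa [hw] using List.mem_toFinset.2 this
    have hcard : d0.keys.toFinset.card < (Finset.Icc 1 (N + 1)).card := by
      have h1 : d0.keys.toFinset.card ≤ N := by
        simpa using d0.keys.toFinset_card_le
      have h2 : (Finset.Icc 1 (N + 1)).card = N + 1 := by
        simp [Nat.card_Icc]
      omega
    obtain ⟨i, hi, j, hj, hne, heq⟩ :=
      Finset.exists_ne_map_eq_of_card_lt_of_maps_to hcard hmem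
    simp only [Finset.mem_Icc] at hi hj
    -- the two options are equal (both are some)
    have hopt : ∀ a b : Nat, 1 ≤ a → a ≤ N + 1 → 1 ≤ b → b ≤ N + 1 →
        ((pvF d0)^[a] (some u)).getD "" = ((pvF d0)^[b] (some u)).getD "" →
        (pvF d0)^[a] (some u) = (pvF d0)^[b] (some u) := by
      intro a b ha1 ha2 hb1 hb2 hgd
      obtain ⟨wa, hwa⟩ := pvF_isSome_of_le d0 (some u) a m (by omega) v hit
      obtain ⟨wb, hwb⟩ := pvF_isSome_of_le d0 (some u) b m (by omega) v hit
      rw [hwa, hwb] at hgd ⊢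
      simpa using hgd
    rcases Nat.lt_or_ge i j with hij | hij
    · have heq' := hopt i j hi.1 hi.2 hj.1 hj.2 heq
      have hper := pvIter_period (pvF d0) (some u) i j (by omega) heq' (m - (j - i)) (by omega)
      have : m - (j - i) + (j - i) = m := by omega
      rw [this] at hper
      exact IH (m - (j - i)) (by omega) (by omega) v (hper.symm ▸ hit) hv
    · have hji : j < i := by omega
      have heq' := (hopt i j hi.1 hi.2 hj.1 hj.2 heq).symm
      have hper := pvIter_period (pvF d0) (some u) j i (by omega) heq' (m - (i - j)) (by omega)
      have : m - (i - j) + (i - j) = m := by omega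
      rw [this] at hper
      exact IH (m - (i - j)) (by omega) (by omega) v (hper.symm ▸ hit) hv

theorem pvAns_step (d0 : pvLD) (u p : String) (h : pvPstep d0 u = some p)
    (ha : pvAns d0 p) : pvAns d0 u := by
  obtain ⟨k, hk1, hk2, v, hv, hc⟩ := ha
  have : (pvF d0)^[k + 1] (some u) = some v := by
    rw [Function.iterate_succ_apply]
    show (pvF d0)^[k] (pvPstep d0 u) = some v
    rw [h]; exact hv
  exact pvAns_of_iter d0 u (k + 1) (by omega) v this hc

theorem pvAns_one (d0 : pvLD) (u p : String) (h : pvPstep d0 u = some p)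
    (hc : pvHasC d0 p = true) : pvAns d0 u := by
  refine pvAns_of_iter d0 u 1 (by omega) p ?_ hc
  simpa [pvF] using h


theorem pvContains_get? {κ ν : Type} [BEq κ] [LawfulBEq κ] (d : PySem.Dict κ ν) (k : κ)
    (h : d.contains k = true) : ∃ v, d.get? k = some v := by
  rw [PySem.Dict.contains_eq_isSome_get?] at h
  exact Option.isSome_iff_exists.1 h

-- any successful result of get_parent_coords carries non-empty coordinates
theorem pvFind_some_nonempty (d : pvLD) (fuel : Nat) (u : String) (V : PySem.Set String)
    (t : String × String × String) (h : pvGetParentCoords d fuel u V = some t) :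
    t.1 ≠ "" ∧ t.2.1 ≠ "" := by
  induction fuel generalizing u V with
  | zero => simp [pvGetParentCoords] at h
  | succ fuel ih =>
    rw [pvGetParentCoords] at h
    split at h
    · simp at h
    · cases hg : d.get? u with
      | none => rw [hg] at h; simp at h
      | some data =>
        rw [hg] at h
        simp only at h
        split at h
        · simp at h
        · cases hp : d.get? (data.getD "parent_id" "") with
          | none => rw [hp] at h; simp at h
          | some pdata =>
            rw [hp] at h
            simp only at h
            split at h
            next hc =>
              obtain rfl := Option.some.inj h
              exact hc
            next => exact ih _ _ h

-- a successful find implies the static answer (under the invariant's reading of d)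
theorem pvFind_ans (d0 d : pvLD)
    (hP : ∀ x, pvPstep d x = pvPstep d0 x)
    (hH : ∀ x, pvHasC d x = true → pvHasC d0 x = true ∨ pvAns d0 x)
    (fuel : Nat) (u : String) (V : PySem.Set String) (t : String × String × String)
    (h : pvGetParentCoords d fuel u V = some t) : pvAns d0 u := by
  induction fuel generalizing u V with
  | zero => simp [pvGetParentCoords] at h
  | succ fuel ih =>
    rw [pvGetParentCoords] at h
    split at h
    · simp at h
    · cases hg : d.get? u with
      | none => rw [hg] at h; simp at h
      | some data =>
        rw [hg] at h
        simp only at h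
        split at h
        · simp at h
        next hcond =>
          -- the parent step is valid: pvPstep d u = some pid
          have hpid : pvPstep d u = some (data.getD "parent_id" "") := by
            unfold pvPstep
            rw [hg]
            simp only
            rw [if_pos]
            constructor
            · intro he; exact hcond (Or.inl he)
            · cases hco : d.contains (data.getD "parent_id" "") with
              | true => rfl
              | false => exact absurd (Or.inr hco) hcond
          have hpid0 : pvPstep d0 u = some (data.getD "parent_id" "") := by rw [← hP]; exact hpid
          cases hp : d.get? (data.getD "parent_id" "") with
          | none => rw [hp] at h; simp at h
          | some pdata =>
            rw [hp] at h
            simp only at h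
            split at h
            next hc =>
              -- parent has coordinates in d
              have hcd : pvHasC d (data.getD "parent_id" "") = true := by
                unfold pvHasC; rw [hp]; exact decide_eq_true hc
              rcases hH _ hcd with h0 | ha
              · exact pvAns_one d0 u _ hpid0 h0
              · exact pvAns_step d0 u _ hpid0 ha
            next => exact pvAns_step d0 u _ hpid0 (ih _ _ h)

-- sufficiency: a fresh chain (distinct, unvisited) reaching coordinates makes find succeed
theorem pvFind_suff (d0 d : pvLD) (hP : ∀ x, pvPstep d x = pvPstep d0 x) :
    ∀ k, 1 ≤ k → ∀ fuel u V, k ≤ fuel →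
    (∃ v, (pvF d0)^[k] (some u) = some v ∧ pvHasC d v = true) →
    (∀ i w, i < k → (pvF d0)^[i] (some u) = some w → PySem.Set.contains V w = false) →
    (∀ i j, i < j → j < k → (pvF d0)^[i] (some u) ≠ (pvF d0)^[j] (some u)) →
    ∃ t, pvGetParentCoords d fuel u V = some t := by
  intro k
  induction k with
  | zero => omega
  | succ k ih =>
    intro _ fuel u V hfuel ⟨v, hv, hcv⟩ hVfree hdist
    obtain ⟨fuel, rfl⟩ : ∃ f', fuel = f' + 1 := ⟨fuel - 1, by omega⟩
    -- first step of the chain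
    have hstep1 : (pvF d0)^[k+1] (some u) = (pvF d0)^[k] (pvPstep d0 u) := by
      rw [Function.iterate_succ_apply]; rfl
    cases hps : pvPstep d0 u with
    | none =>
      rw [hstep1, hps, pvF_iterate_none] at hv; simp at hv
    | some p =>
      have hpd : pvPstep d u = some p := by rw [hP]; exact hps
      obtain ⟨data, hg, hpe, hpne, hco⟩ := pvPstep_elim d u p hpd
      subst hpe
      have hu_notV : PySem.Set.contains V u = false := hVfree 0 u (by omega) rfl
      have hu_nm : u ∉ V := by
        intro hm
        rw [(PySem.Set.contains_iff V u).2 hm] at hu_notV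
        cases hu_notV
      obtain ⟨pdata, hgp⟩ := pvContains_get? d (data.getD "parent_id" "") hco
      have hcondneg : ¬(data.getD "parent_id" "" = "" ∨ d.contains (data.getD "parent_id" "") = false) := by
        rintro (he | hcf)
        · exact hpne he
        · rw [hco] at hcf; cases hcf
      rw [pvGetParentCoords]
      rw [if_neg (by simpa using hu_nm), hg]
      simp only
      rw [if_neg hcondneg, hgp]
      simp only
      split
      · exact ⟨_, rfl⟩
      next hnc =>
        -- parent lacks coordinates: k ≥ 1 (else v = p would have them), recurse
        have hHp : pvHasC d (data.getD "parent_id" "") = false := by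
          unfold pvHasC
          rw [hgp]
          simpa using hnc
        cases k with
        | zero =>
          rw [hstep1, hps] at hv
          simp only [Function.iterate_zero, id] at hv
          obtain rfl := Option.some.inj hv
          rw [hHp] at hcv; exact absurd hcv (by simp)
        | succ k' =>
          refine ih (by omega) fuel (data.getD "parent_id" "") (PySem.Set.add V u) (by omega) ?_ ?_ ?_
          · exact ⟨v, by rw [← hps, ← hstep1]; exact hv, hcv⟩
          · intro i w hi hw
            have hw' : (pvF d0)^[i+1] (some u) = some w := by
              rw [Function.iterate_succ_apply]
              show (pvF d0)^[i] (pvPstep d0 u) = some w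
              rw [hps]; exact hw
            have h1 : PySem.Set.contains V w = false := hVfree (i+1) w (by omega) hw'
            have h2 : w ≠ u := by
              intro he
              have := hdist 0 (i+1) (by omega) (by omega)
              apply this
              simp only [Function.iterate_zero, id]
              rw [hw', he]
            rw [← Bool.not_eq_true]
            intro hmem
            rcases (PySem.Set.contains_iff _ _).1 hmem |> (PySem.Set.mem_add _ _ _).1 with h | h
            · rw [(PySem.Set.contains_iff _ _).2 h] at h1; simp at h1
            · exact h2 h
          · intro i j hij hjk
            have := hdist (i+1) (j+1) (by omega) (by omega)
            intro he
            apply this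
            rw [Function.iterate_succ_apply, Function.iterate_succ_apply]
            show (pvF d0)^[i] (pvPstep d0 u) = (pvF d0)^[j] (pvPstep d0 u)
            rw [hps]; exact he


-- the static answer makes A's find succeed: choose the first coordinate hit; its prefix is distinct
theorem pvAns_find (d0 d : pvLD)
    (hP : ∀ x, pvPstep d x = pvPstep d0 x)
    (hO : ∀ x, pvHasC d0 x = true → pvHasC d x = true)
    (u : String) (ha : pvAns d0 u) :
    ∃ t, pvGetParentCoords d (d0.keys.length + 2) u PySem.Set.empty = some t := by
  obtain ⟨k0, hk1, hk2, v0, hv0, hc0⟩ := ha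
  have hQ : ∃ m, 1 ≤ m ∧ ((pvF d0)^[m] (some u)).rec false (fun v => pvHasC d v) = true := by
    refine ⟨k0, hk1, ?_⟩
    rw [hv0]
    exact hO v0 hc0
  classical
  let km := Nat.find hQ
  obtain ⟨hkm1, hkmQ⟩ : 1 ≤ km ∧ ((pvF d0)^[km] (some u)).rec false (fun v => pvHasC d v) = true :=
    Nat.find_spec hQ
  have hkmin : ∀ m, m < km → ¬(1 ≤ m ∧ ((pvF d0)^[m] (some u)).rec false (fun v => pvHasC d v) = true) :=
    fun m hm => Nat.find_min hQ hm
  have hkle : km ≤ k0 := Nat.find_min' hQ ⟨hk1, by rw [hv0]; exact hO v0 hc0⟩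
  obtain ⟨vm, hvm⟩ : ∃ v, (pvF d0)^[km] (some u) = some v := by
    cases hvv : (pvF d0)^[km] (some u) with
    | none => rw [hvv] at hkmQ; simp at hkmQ
    | some v => exact ⟨v, rfl⟩
  have hcvm : pvHasC d vm = true := by rw [hvm] at hkmQ; exact hkmQ
  refine pvFind_suff d0 d hP km hkm1 (d0.keys.length + 2) u PySem.Set.empty (by omega)
    ⟨vm, hvm, hcvm⟩ (fun i w _ _ => rfl) ?_
  -- the prefix below the first hit is duplicate-free
  intro i j hij hjk heq
  have hper := pvIter_period (pvF d0) (some u) i j (by omega) heq (km - (j - i)) (by omega)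
  have hh : km - (j - i) + (j - i) = km := by omega
  rw [hh] at hper
  refine hkmin (km - (j - i)) (by omega) ⟨by omega, ?_⟩
  rw [← hper, hvm]
  exact hcvm

-- the complete characterisation of A's find under the invariant
theorem pvFind_iff (d0 d : pvLD) (hI : pvInv d0 d) (u : String) :
    (∃ t, pvGetParentCoords d (d0.keys.length + 2) u PySem.Set.empty = some t) ↔ pvAns d0 u := by
  obtain ⟨hP, hH, hO⟩ := hI
  constructor
  · rintro ⟨t, ht⟩
    exact pvFind_ans d0 d hP hH _ u _ t ht
  · exact pvAns_find d0 d hP hO u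


-- the snapshot pass of B computes exactly the static parent step and coordinate set
theorem pvBuild_fold_spec (d0 : pvLD) (l : List (String × PySem.Dict String String)) :
    ∀ (p0 : PySem.Dict String String) (h0 : PySem.Set String),
    (∀ q ∈ l, d0.get? q.1 = some q.2) →
    (l.map Prod.fst).Nodup →
    (∀ k ∈ l.map Prod.fst, p0.get? k = none) →
    (∀ u, (l.foldl (fun st p =>
        (if p.2.getD "parent_id" "" ≠ "" ∧ d0.contains (p.2.getD "parent_id" "") = true
           then st.1.insert p.1 (p.2.getD "parent_id" "") else st.1,
         if p.2.getD "latitude" "" ≠ "" ∧ p.2.getD "longitude" "" ≠ "" then PySem.Set.add st.2 p.1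
           else st.2)) (p0, h0)).1.get? u
      = if u ∈ l.map Prod.fst then pvPstep d0 u else p0.get? u) ∧
    (∀ x, PySem.Set.contains (l.foldl (fun st p =>
        (if p.2.getD "parent_id" "" ≠ "" ∧ d0.contains (p.2.getD "parent_id" "") = true
           then st.1.insert p.1 (p.2.getD "parent_id" "") else st.1,
         if p.2.getD "latitude" "" ≠ "" ∧ p.2.getD "longitude" "" ≠ "" then PySem.Set.add st.2 p.1
           else st.2)) (p0, h0)).2 x = true
      ↔ (PySem.Set.contains h0 x = true ∨ (x ∈ l.map Prod.fst ∧ pvHasC d0 x = true))) := by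
  induction l with
  | nil => intro p0 h0 _ _ _; simp
  | cons q l ih =>
    intro p0 h0 hval hnd hnone
    have hhead : d0.get? q.1 = some q.2 := hval q (by simp)
    have hndt : (l.map Prod.fst).Nodup := by simpa using hnd.sublist (by simp)
    have hq_nt : q.1 ∉ l.map Prod.fst := by
      have := hnd
      simp only [List.map_cons, List.nodup_cons] at this
      exact this.1
    simp only [List.foldl_cons]
    set p1 := if q.2.getD "parent_id" "" ≠ "" ∧ d0.contains (q.2.getD "parent_id" "") = true
             then p0.insert q.1 (q.2.getD "parent_id" "") else p0 with hp1
    set s1 := if q.2.getD "latitude" "" ≠ "" ∧ q.2.getD "longitude" "" ≠ "" then PySem.Set.add h0 q.1 else h0 with hs1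
    have hp1tail : ∀ k ∈ l.map Prod.fst, p1.get? k = none := by
      intro k hk
      have hkne : k ≠ q.1 := fun he => hq_nt (he ▸ hk)
      have hk0 : p0.get? k = none := hnone k (by simp [hk])
      rw [hp1]
      split
      · rw [PySem.Dict.get?_insert_of_ne _ _ hkne]; exact hk0
      · exact hk0
    obtain ⟨ihP, ihS⟩ := ih p1 s1 (fun q' hq' => hval q' (by simp [hq'])) hndt hp1tail
    constructor
    · intro u
      rw [ihP u]
      by_cases hmem : u ∈ l.map Prod.fst
      · rw [if_pos hmem, if_pos (by simp [hmem])]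
      · rw [if_neg hmem]
        by_cases hu : u = q.1
        · subst hu
          rw [if_pos (by simp)]
          unfold pvPstep
          rw [hhead]
          simp only
          rw [hp1]
          split
          next => simp [PySem.Dict.get?_insert_self]
          next => exact hnone q.1 (by simp)
        · rw [if_neg (by simp [hu, hmem]), hp1]
          split
          · rw [PySem.Dict.get?_insert_of_ne _ _ hu]
          · rfl
    · intro x
      rw [ihS x]
      have hhc : pvHasC d0 q.1 = decide (q.2.getD "latitude" "" ≠ "" ∧ q.2.getD "longitude" "" ≠ "") := by
        unfold pvHasC; rw [hhead]
      have hs1c : PySem.Set.contains s1 x = true ↔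
          (PySem.Set.contains h0 x = true ∨ (x = q.1 ∧ pvHasC d0 q.1 = true)) := by
        rw [hs1]
        split
        next hc =>
          rw [PySem.Set.contains_iff, PySem.Set.mem_add]
          constructor
          · rintro (hm | he)
            · exact Or.inl ((PySem.Set.contains_iff _ _).2 hm)
            · exact Or.inr ⟨he, by rw [hhc]; exact decide_eq_true hc⟩
          · rintro (hm | ⟨he, _⟩)
            · exact Or.inl ((PySem.Set.contains_iff _ _).1 hm)
            · exact Or.inr he
        next hc =>
          constructor
          · exact Or.inl
          · rintro (hm | ⟨he, hhx⟩)
            · exact hm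
            · subst he
              rw [hhc] at hhx
              exact absurd (of_decide_eq_true hhx) hc
      rw [hs1c]
      constructor
      · rintro ((hm | ⟨he, hx⟩) | ⟨hm, hx⟩)
        · exact Or.inl hm
        · exact Or.inr ⟨by simp [he], he ▸ hx⟩
        · exact Or.inr ⟨by simp [hm], hx⟩
      · rintro (hm | ⟨hmem, hx⟩)
        · exact Or.inl (Or.inl hm)
        · rcases (by simpa using hmem : x = q.1 ∨ x ∈ l.map Prod.fst) with he | hm'
          · exact Or.inl (Or.inr ⟨he, he ▸ hx⟩)
          · exact Or.inr ⟨hm', hx⟩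

-- B's bounded climb finds exactly the chains the static answer describes
theorem pvClimb_iff (d0 : pvLD) (parent : PySem.Dict String String) (has : PySem.Set String)
    (hpar : ∀ u, parent.get? u = pvPstep d0 u)
    (hhas : ∀ x, PySem.Set.contains has x = true ↔ pvHasC d0 x = true) :
    ∀ n u, pvClimb parent has n u = true ↔
      (∃ k, 1 ≤ k ∧ k ≤ n ∧ ∃ v, (pvF d0)^[k] (some u) = some v ∧ pvHasC d0 v = true) := by
  intro n
  induction n with
  | zero =>
    intro u
    simp only [pvClimb]
    constructor
    · intro h; cases h
    · rintro ⟨k, hk1, hk2, _⟩; omega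
  | succ n ih =>
    intro u
    rw [pvClimb, hpar]
    cases hps : pvPstep d0 u with
    | none =>
      simp only
      constructor
      · intro h; cases h
      · rintro ⟨k, hk1, hk2, v, hv, _⟩
        exfalso
        have h1 : (pvF d0)^[k] (some u) = (pvF d0)^[k-1] (pvF d0 (some u)) := by
          conv_lhs => rw [show k = (k - 1) + 1 from by omega]
          rw [Function.iterate_succ_apply]
        rw [h1, show pvF d0 (some u) = pvPstep d0 u from rfl, hps, pvF_iterate_none] at hv
        cases hv
    | some p =>
      simp only
      have hshift : ∀ (m : Nat), (pvF d0)^[m + 1] (some u) = (pvF d0)^[m] (some p) := by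
        intro m
        rw [Function.iterate_succ_apply]
        show (pvF d0)^[m] (pvPstep d0 u) = _
        rw [hps]
      by_cases hcp : PySem.Set.contains has p = true
      · rw [if_pos hcp]
        simp only [true_iff]
        exact ⟨1, le_refl 1, by omega, p, by simpa [pvF] using hps, (hhas p).1 hcp⟩
      · rw [if_neg hcp, ih p]
        constructor
        · rintro ⟨k, hk1, hk2, v, hv, hc⟩
          exact ⟨k + 1, by omega, by omega, v, by rw [hshift]; exact hv, hc⟩
        · rintro ⟨k, hk1, hk2, v, hv, hc⟩
          cases k with
          | zero => omega
          | succ k' =>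
            cases k' with
            | zero =>
              exfalso
              rw [hshift 0] at hv
              simp only [Function.iterate_zero, id] at hv
              have hpv : p = v := Option.some.inj hv
              subst hpv
              exact hcp ((hhas p).2 hc)
            | succ k'' =>
              exact ⟨k'' + 1, by omega, by omega, v, by rw [← hshift]; exact hv, hc⟩


theorem pvKeys_eq (d : pvLD) : d.keys = d.items.map Prod.fst := by
  simp [PySem.Dict.keys]

theorem pvContains_insert_mem (d : pvLD) (k : String) (v : PySem.Dict String String)
    (h : d.contains k = true) (y : String) : (d.insert k v).contains y = d.contains y := by
  rw [PySem.Dict.contains_insert]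
  cases hyk : (y == k) with
  | false => simp
  | true =>
    have : y = k := eq_of_beq hyk
    subst this
    simp [h]

theorem pvHasC_eq_of_get? (d d' : pvLD) (u : String) (h : d.get? u = d'.get? u) :
    pvHasC d u = pvHasC d' u := by
  unfold pvHasC; rw [h]

theorem pvPstep_of_get? (d : pvLD) (u : String) (data : PySem.Dict String String)
    (h : d.get? u = some data) :
    pvPstep d u = if data.getD "parent_id" "" ≠ "" ∧ d.contains (data.getD "parent_id" "") = true
                  then some (data.getD "parent_id" "") else none := by
  unfold pvPstep; rw [h]

theorem pvParent_get (d0 : pvLD) (hnd : d0.keys.Nodup) (u : String) :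
    (pvBuild d0).1.get? u = pvPstep d0 u := by
  have hvals : ∀ q ∈ d0.items, d0.get? q.1 = some q.2 := by
    intro q hq
    obtain ⟨k, v⟩ := q
    exact PySem.Dict.get?_of_mem_items d0 hq hnd
  have hnd' : (d0.items.map Prod.fst).Nodup := by rw [← pvKeys_eq]; exact hnd
  obtain ⟨hP, _⟩ := pvBuild_fold_spec d0 d0.items PySem.Dict.empty PySem.Set.empty hvals hnd'
    (fun k _ => by simp [PySem.Dict.get?_empty])
  have hB : pvBuild d0 = d0.items.foldl (fun st p =>
        (if p.2.getD "parent_id" "" ≠ "" ∧ d0.contains (p.2.getD "parent_id" "") = true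
           then st.1.insert p.1 (p.2.getD "parent_id" "") else st.1,
         if p.2.getD "latitude" "" ≠ "" ∧ p.2.getD "longitude" "" ≠ "" then PySem.Set.add st.2 p.1
           else st.2)) (PySem.Dict.empty, PySem.Set.empty) := rfl
  rw [hB, hP u]
  split
  · rfl
  next hnm =>
    rw [PySem.Dict.get?_empty]
    have : d0.get? u = none := by
      rw [PySem.Dict.get?_eq_none_iff_not_mem_keys, pvKeys_eq]
      exact hnm
    unfold pvPstep
    rw [this]

theorem pvHas_iff (d0 : pvLD) (hnd : d0.keys.Nodup) (x : String) :
    PySem.Set.contains (pvBuild d0).2 x = true ↔ pvHasC d0 x = true := by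
  have hvals : ∀ q ∈ d0.items, d0.get? q.1 = some q.2 := by
    intro q hq
    obtain ⟨k, v⟩ := q
    exact PySem.Dict.get?_of_mem_items d0 hq hnd
  have hnd' : (d0.items.map Prod.fst).Nodup := by rw [← pvKeys_eq]; exact hnd
  obtain ⟨_, hS⟩ := pvBuild_fold_spec d0 d0.items PySem.Dict.empty PySem.Set.empty hvals hnd'
    (fun k _ => by simp [PySem.Dict.get?_empty])
  have hB : pvBuild d0 = d0.items.foldl (fun st p =>
        (if p.2.getD "parent_id" "" ≠ "" ∧ d0.contains (p.2.getD "parent_id" "") = true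
           then st.1.insert p.1 (p.2.getD "parent_id" "") else st.1,
         if p.2.getD "latitude" "" ≠ "" ∧ p.2.getD "longitude" "" ≠ "" then PySem.Set.add st.2 p.1
           else st.2)) (PySem.Dict.empty, PySem.Set.empty) := rfl
  rw [hB, hS x]
  constructor
  · rintro (he | ⟨_, hx⟩)
    · simp [PySem.Set.empty] at he
    · exact hx
  · intro hx
    refine Or.inr ⟨?_, hx⟩
    unfold pvHasC at hx
    cases hg : d0.get? x with
    | none => rw [hg] at hx; simp at hx
    | some data =>
      have : x ∈ d0.keys := by
        rw [← PySem.Dict.contains_iff_mem_keys, PySem.Dict.contains_eq_isSome_get?, hg]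
        rfl
      rw [pvKeys_eq] at this
      exact this

theorem pvClimbAns (d0 : pvLD) (hnd : d0.keys.Nodup) (u : String) :
    pvClimb (pvBuild d0).1 (pvBuild d0).2 d0.items.length u = true ↔ pvAns d0 u := by
  have hlen : d0.items.length = d0.keys.length := by rw [pvKeys_eq, List.length_map]
  rw [pvClimb_iff d0 (pvBuild d0).1 (pvBuild d0).2 (pvParent_get d0 hnd) (pvHas_iff d0 hnd)
    d0.items.length u, hlen]
  rfl

-- the main loop: A's stateful fold counts exactly what B's pure fold counts
theorem pvMainFold (d0 : pvLD) (hnd0 : d0.keys.Nodup) (l : List (String × PySem.Dict String String)) :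
    ∀ (d : pvLD) (c : Int),
    (l.map Prod.fst).Nodup →
    (∀ q ∈ l, d0.get? q.1 = some q.2) →
    (∀ q ∈ l, d.get? q.1 = some q.2) →
    pvInv d0 d →
    ((l.map Prod.fst).foldl (pvAStep (d0.keys.length + 2)) (d, c)).2
      = l.foldl (fun cnt p =>
          if p.2.get? "level" ≠ some "dialect" then cnt
          else if PySem.Set.contains (pvBuild d0).2 p.1 then cnt
          else if pvClimb (pvBuild d0).1 (pvBuild d0).2 d0.items.length p.1 then cnt + 1 else cnt) c := by
  induction l with
  | nil => intro d c _ _ _ _; rfl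
  | cons q l ih =>
    intro d c hnd hv0 hvd hI
    have hndt : (l.map Prod.fst).Nodup := by simpa using hnd.sublist (by simp)
    have hq_nt : q.1 ∉ l.map Prod.fst := by
      have := hnd
      simp only [List.map_cons, List.nodup_cons] at this
      exact this.1
    have hd0q : d0.get? q.1 = some q.2 := hv0 q (by simp)
    have hdq : d.get? q.1 = some q.2 := hvd q (by simp)
    simp only [List.map_cons, List.foldl_cons]
    have hdata : d.getD q.1 PySem.Dict.empty = q.2 := by
      rw [PySem.Dict.getD_eq_get?_getD, hdq]; rfl
    -- characterise the head step of A
    rw [pvAStep]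
    simp only [hdata]
    have hHCq : pvHasC d0 q.1 = decide (q.2.getD "latitude" "" ≠ "" ∧ q.2.getD "longitude" "" ≠ "") := by
      unfold pvHasC; rw [hd0q]
    by_cases hlvl : q.2.get? "level" ≠ some "dialect"
    · rw [if_pos hlvl, if_pos hlvl]
      exact ih d c hndt (fun q' h => hv0 q' (by simp [h])) (fun q' h => hvd q' (by simp [h])) hI
    · rw [if_neg hlvl, if_neg hlvl]
      by_cases hown : q.2.getD "latitude" "" ≠ "" ∧ q.2.getD "longitude" "" ≠ ""
      · rw [if_pos hown, if_pos (by rw [pvHas_iff d0 hnd0 q.1, hHCq]; exact decide_eq_true hown)]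
        exact ih d c hndt (fun q' h => hv0 q' (by simp [h])) (fun q' h => hvd q' (by simp [h])) hI
      · rw [if_neg hown, if_neg (by
          intro hco
          rw [pvHas_iff d0 hnd0 q.1, hHCq] at hco
          exact hown (of_decide_eq_true hco))]
        cases hfind : pvGetParentCoords d (d0.keys.length + 2) q.1 PySem.Set.empty with
        | none =>
          have hnoans : ¬ pvAns d0 q.1 := by
            intro ha
            obtain ⟨t, ht⟩ := (pvFind_iff d0 d hI q.1).2 ha
            rw [hfind] at ht; cases ht
          rw [if_neg (by rw [pvClimbAns d0 hnd0 q.1]; exact hnoans)]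
          exact ih d c hndt (fun q' h => hv0 q' (by simp [h])) (fun q' h => hvd q' (by simp [h])) hI
        | some t =>
          obtain ⟨t1, t2, t3⟩ := t
          have hne := pvFind_some_nonempty d _ q.1 _ _ hfind
          simp only at hne
          have hAns : pvAns d0 q.1 := pvFind_ans d0 d hI.1 hI.2.1 _ q.1 _ _ hfind
          rw [if_pos (by rw [pvClimbAns d0 hnd0 q.1]; exact hAns)]
          simp only
          rw [if_pos hne]
          -- the mutated dict preserves the invariant
          set data1 := (q.2.insert "latitude" t1).insert "longitude" t2 with hdata1
          set data2 := if data1.getD "country_ids" "" = "" ∧ t3 ≠ "" then data1.insert "country_ids" t3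
                       else data1 with hdata2
          set d' := d.insert q.1 data2 with hd'
          have hcontq : d.contains q.1 = true := by
            rw [PySem.Dict.contains_eq_isSome_get?, hdq]; rfl
          have hcont' : ∀ y, d'.contains y = d.contains y :=
            pvContains_insert_mem d q.1 data2 hcontq
          have hget' : ∀ x, x ≠ q.1 → d'.get? x = d.get? x := by
            intro x hx
            rw [hd']
            exact PySem.Dict.get?_insert_of_ne _ _ hx
          have hgetq' : d'.get? q.1 = some data2 := by
            rw [hd']
            simp [PySem.Dict.get?_insert_self]
          have hd2par : data2.getD "parent_id" "" = q.2.getD "parent_id" "" := by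
            rw [hdata2]
            have h1 : data1.getD "parent_id" "" = q.2.getD "parent_id" "" := by
              rw [hdata1, PySem.Dict.getD_insert_of_ne _ _ _ (by decide),
                PySem.Dict.getD_insert_of_ne _ _ _ (by decide)]
            split
            · rw [PySem.Dict.getD_insert_of_ne _ _ _ (by decide), h1]
            · exact h1
          have hd2lat : data2.getD "latitude" "" = t1 := by
            rw [hdata2]
            have h1 : data1.getD "latitude" "" = t1 := by
              rw [hdata1, PySem.Dict.getD_insert_of_ne _ _ _ (by decide)]
              simp [PySem.Dict.getD_insert_self]
            split
            · rw [PySem.Dict.getD_insert_of_ne _ _ _ (by decide), h1]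
            · exact h1
          have hd2lon : data2.getD "longitude" "" = t2 := by
            rw [hdata2]
            have h1 : data1.getD "longitude" "" = t2 := by
              rw [hdata1]
              simp [PySem.Dict.getD_insert_self]
            split
            · rw [PySem.Dict.getD_insert_of_ne _ _ _ (by decide), h1]
            · exact h1
          have hI' : pvInv d0 d' := by
            obtain ⟨hP, hH, hO⟩ := hI
            refine ⟨?_, ?_, ?_⟩
            · intro x
              by_cases hx : x = q.1
              · subst hx
                rw [pvPstep_of_get? d' q.1 data2 hgetq', ← hP q.1, pvPstep_of_get? d q.1 q.2 hdq,
                  hd2par, hcont' _]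
              · rw [← hP x]
                unfold pvPstep
                rw [hget' x hx]
                cases d.get? x with
                | none => rfl
                | some dd => simp only [hcont' _]
            · intro x hx
              by_cases hxq : x = q.1
              · subst hxq
                exact Or.inr hAns
              · rw [pvHasC_eq_of_get? d' d x (hget' x hxq)] at hx
                exact hH x hx
            · intro x hx
              by_cases hxq : x = q.1
              · subst hxq
                unfold pvHasC
                rw [hgetq']
                show decide (data2.getD "latitude" "" ≠ "" ∧ data2.getD "longitude" "" ≠ "") = true
                rw [hd2lat, hd2lon]
                exact decide_eq_true hne
              · rw [pvHasC_eq_of_get? d' d x (hget' x hxq)]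
                exact hO x hx
          exact ih d' (c + 1) hndt (fun q' h => hv0 q' (by simp [h]))
            (fun q' h => by
              have hne' : q'.1 ≠ q.1 := by
                intro he
                exact hq_nt (he ▸ (List.mem_map_of_mem h : q'.1 ∈ l.map Prod.fst))
              rw [hget' q'.1 hne']
              exact hvd q' (by simp [h])) hI'

-- ===== VERDICT (by name: the statement is the Claim_ definition above) =====
theorem inherit_geographic_data_spec : Claim_equal_inherit_geographic_data := by
  intro ld _
  unfold Spec_inherit_geographic_data
  set d0 := pvToDict ld with hd0
  have hnd : d0.keys.Nodup := PySem.Dict.nodup_keys_ofList _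
  have hvals : ∀ q ∈ d0.items, d0.get? q.1 = some q.2 := by
    intro q hq
    obtain ⟨k, v⟩ := q
    exact PySem.Dict.get?_of_mem_items d0 hq hnd
  have hndm : (d0.items.map Prod.fst).Nodup := by rw [← pvKeys_eq]; exact hnd
  have hmain := pvMainFold d0 hnd d0.items d0 0 hndm hvals hvals
    ⟨fun _ => rfl, fun _ h => Or.inl h, fun _ h => h⟩
  have hA : inherit_geographic_data ld = (d0.keys.foldl (pvAStep (d0.keys.length + 2)) (d0, 0)).2 := rfl
  have hB : inherit_geographic_data_alt ld = d0.items.foldl (fun cnt p =>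
      if p.2.get? "level" ≠ some "dialect" then cnt
      else if PySem.Set.contains (pvBuild d0).2 p.1 then cnt
      else if pvClimb (pvBuild d0).1 (pvBuild d0).2 d0.items.length p.1 then cnt + 1 else cnt) 0 := rfl
  rw [hA, hB, pvKeys_eq d0]
  rw [pvKeys_eq d0] at hmain
  exact hmain
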